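-- pv_equiv track=rewrite | github.com/hankyeolk/PythonStudy | 자료구조/자료구조1.py | palindrome2
-- ===== SOURCE A (Python) =====
-- def palindrome2(a):
--
--   i = 0
--   j = len(a) - 1
--   while i < j:
--     if a[i].isalpha() == False:  # i번째 글자가 알파벳이 아니면 뒤로 한칸 이동
--       i += 1
--     elif a[j].isalpha() == False:
--       j -= 1
--     elif a[i].lower() != a[j].lower():
--       return False
--
--     else:
--       i += 1
--       j -= 1
--
--   return True
-- ===== SOURCE B (Python) =====
-- def palindrome2(a):
--   cleaned = [c.lower() for c in a if c.isalpha()]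
--   return cleaned == cleaned[::-1]
-- ===== Notes on version B (the rewrite author's own statement) =====
-- stated objective: simpler
-- what changed: Replaces the in-place two-pointer skip-walk over indices by a filter-then-compare: build the lowercased alphabetic characters once and compare the list with its reverse.
import Mathlib
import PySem

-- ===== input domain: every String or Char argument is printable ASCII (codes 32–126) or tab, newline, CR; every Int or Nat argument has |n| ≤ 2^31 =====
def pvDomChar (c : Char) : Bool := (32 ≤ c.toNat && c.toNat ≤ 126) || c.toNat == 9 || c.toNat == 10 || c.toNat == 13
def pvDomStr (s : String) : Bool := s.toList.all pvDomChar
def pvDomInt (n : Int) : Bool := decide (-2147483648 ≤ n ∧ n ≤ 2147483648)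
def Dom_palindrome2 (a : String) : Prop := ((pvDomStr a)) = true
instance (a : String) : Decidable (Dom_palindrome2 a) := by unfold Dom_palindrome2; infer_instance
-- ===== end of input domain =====

-- B replaces A's in-place two-pointer skip-walk by filter-then-compare-with-reverse (objective: simpler).


-- ===== PORT A =====
-- A's while loop over two Int indices. The loop body only runs with 0 <= i < j <= len-1, so
-- both pyGet? lookups always return `some`; `.getD ' '` only unwraps them (the default is unreachable
-- from palindrome2, which calls the loop with i = 0, j = len(a) - 1).
def pvLoopA (s : List Char) (i j : Int) : Bool :=
  if _h : i < j then
    let ci := (PySem.List.pyGet? s i).getD ' '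
    let cj := (PySem.List.pyGet? s j).getD ' '
    if PySem.Chars.isalpha ci = false then pvLoopA s (i + 1) j
    else if PySem.Chars.isalpha cj = false then pvLoopA s i (j - 1)
    else if PySem.Chars.lowerChar ci != PySem.Chars.lowerChar cj then false
    else pvLoopA s (i + 1) (j - 1)
  else true
termination_by (j - i).toNat
decreasing_by all_goals omega

def palindrome2 (a : String) : Bool :=
  pvLoopA a.toList 0 (PySem.Str.len a - 1)

-- ===== PORT B =====
-- B: collect the lowercased alphabetic characters in one pass, compare with the reversal.
def palindrome2_alt (a : String) : Bool :=
  let cleaned := (a.toList.filter (fun c => PySem.Chars.isalpha c)).map PySem.Chars.lowerChar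
  cleaned == cleaned.reverse

-- ===== PRECONDITION & SPEC =====
def Spec_palindrome2 (a : String) (out : Bool) : Prop := out = palindrome2_alt a
instance (a : String) (out : Bool) : Decidable (Spec_palindrome2 a out) := by unfold Spec_palindrome2; infer_instance

-- ===== CLAIM (what is proved, stated in full; the proofs are below) =====
def Claim_equal_palindrome2 : Prop := ∀ (a : String), Dom_palindrome2 a → Spec_palindrome2 a (palindrome2 a)

-- ===== LEMMAS AND PROOFS =====

def pvClean (l : List Char) : List Char :=
  (l.filter (fun c => PySem.Chars.isalpha c)).map PySem.Chars.lowerChar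

theorem pal_short (l : List Char) (h : l.length <= 1) : (l == l.reverse) = true := by
  match l, h with
  | [], _ => rfl
  | [x], _ => simp

theorem pal_cons_append (x y : Char) (m : List Char) :
    ((x :: (m ++ [y])) == (x :: (m ++ [y])).reverse) = ((x == y) && (m == m.reverse)) := by
  by_cases hxy : x = y
  · subst hxy
    simp [List.reverse_append]
  · have hne : (x == y) = false := by simp [hxy]
    simp [List.reverse_append, hne]

theorem pvClean_length_le (l : List Char) : (pvClean l).length <= l.length := by
  simp only [pvClean, List.length_map]
  exact List.length_filter_le _ _

theorem seg_cons (s : List Char) (i j : Nat) (hi : i < s.length) (hij : i <= j) :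
    (s.take (j + 1)).drop i = s[i] :: (s.take (j + 1)).drop (i + 1) := by
  rw [List.drop_eq_getElem_cons, List.getElem_take]
  simp [List.length_take]; omega

theorem seg_snoc (s : List Char) (i j : Nat) (hj : j < s.length) (hij : i <= j) :
    (s.take (j + 1)).drop i = (s.take j).drop i ++ [s[j]] := by
  rw [List.take_add_one, List.getElem?_eq_getElem hj]
  rw [List.drop_append_of_le_length]
  · rfl
  · simp [List.length_take]; omega

theorem pvLoopA_eq (s : List Char) (i j : Nat) (hi : i < s.length) (hj : j < s.length) :
    pvLoopA s i j =
      (pvClean ((s.take (j + 1)).drop i) == (pvClean ((s.take (j + 1)).drop i)).reverse) := by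
  by_cases h : i < j
  · have hci : PySem.List.pyGet? s (i : Int) = some s[i] := by
      simp [PySem.List.pyGet?_natCast, List.getElem?_eq_getElem hi]
    have hcj : PySem.List.pyGet? s (j : Int) = some s[j] := by
      simp [PySem.List.pyGet?_natCast, List.getElem?_eq_getElem hj]
    have hlt : (i : Int) < (j : Int) := by exact_mod_cast h
    rw [pvLoopA, dif_pos hlt]
    simp only [hci, hcj, Option.getD_some]
    by_cases hia : PySem.Chars.isalpha s[i] = false
    · -- skip the left character
      have hrec := pvLoopA_eq s (i + 1) j (by omega) hj
      have hclean : pvClean ((s.take (j + 1)).drop i) = pvClean ((s.take (j + 1)).drop (i + 1)) := by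
        rw [seg_cons s i j hi (by omega)]
        simp [pvClean, hia]
      rw [if_pos hia, show (i : Int) + 1 = ((i + 1 : Nat) : Int) by push_cast; ring, hrec, hclean]
    · have hia' : PySem.Chars.isalpha s[i] = true := by
        cases hb : PySem.Chars.isalpha s[i] <;> simp_all
      by_cases hja : PySem.Chars.isalpha s[j] = false
      · -- skip the right character
        have hrec := pvLoopA_eq s i (j - 1) hi (by omega)
        have hclean : pvClean ((s.take (j + 1)).drop i) = pvClean ((s.take (j - 1 + 1)).drop i) := by
          rw [seg_snoc s i j hj (by omega), show j - 1 + 1 = j by omega]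
          simp [pvClean, List.filter_append, hja]
        rw [if_neg (by simp [hia]), if_pos hja,
          show (j : Int) - 1 = ((j - 1 : Nat) : Int) by omega, hrec, hclean]
      · have hja' : PySem.Chars.isalpha s[j] = true := by
          cases hb : PySem.Chars.isalpha s[j] <;> simp_all
        -- both ends alphabetic: decompose the segment as head :: middle ++ [last]
        have hcleanseg :
            pvClean ((s.take (j + 1)).drop i) =
              PySem.Chars.lowerChar s[i] ::
                (pvClean ((s.take j).drop (i + 1)) ++ [PySem.Chars.lowerChar s[j]]) := by
          rw [seg_cons s i j hi (by omega), seg_snoc s (i + 1) j hj (by omega)]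
          simp [pvClean, List.filter_append, hia', hja']
        by_cases hne : PySem.Chars.lowerChar s[i] = PySem.Chars.lowerChar s[j]
        · -- equal ends: recurse on both sides
          have hrec := pvLoopA_eq s (i + 1) (j - 1) (by omega) (by omega)
          rw [if_neg (by simp [hia]), if_neg (by simp [hja']), if_neg (by simp [hne]),
            show (i : Int) + 1 = ((i + 1 : Nat) : Int) by push_cast; ring,
            show (j : Int) - 1 = ((j - 1 : Nat) : Int) by omega, hrec,
            show j - 1 + 1 = j by omega, hcleanseg, pal_cons_append]
          simp [hne]
        · rw [if_neg (by simp [hia]), if_neg (by simp [hja']), if_pos (by simp [hne]),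
            hcleanseg, pal_cons_append]
          simp [hne]
  · -- i >= j: the loop exits with True; the segment has at most one character
    rw [pvLoopA, dif_neg (by exact_mod_cast h)]
    have hlen : ((s.take (j + 1)).drop i).length <= 1 := by
      simp [List.length_take]; omega
    exact (pal_short _ (le_trans (pvClean_length_le _) hlen)).symm
termination_by j - i
decreasing_by all_goals omega

-- ===== VERDICT (by name: the statement is the Claim_ definition above) =====
theorem palindrome2_spec : Claim_equal_palindrome2 := by
  intro a _
  unfold Spec_palindrome2 palindrome2 palindrome2_alt
  have hlen' : PySem.Str.len a = (a.toList.length : Int) := by simp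
  by_cases hnil : a.toList = []
  · rw [pvLoopA]
    simp [hnil]
  · have hpos : 0 < a.toList.length := List.length_pos_iff.mpr hnil
    rw [hlen', show ((a.toList.length : Int) - 1) = ((a.toList.length - 1 : Nat) : Int) by omega,
      show (0 : Int) = ((0 : Nat) : Int) from rfl,
      pvLoopA_eq a.toList 0 (a.toList.length - 1) hpos (by omega),
      show a.toList.length - 1 + 1 = a.toList.length by omega,
      List.take_length, List.drop_zero]
    rfl
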